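-- pv_equiv track=rewrite | github.com/sysu19351146/spine | main.py | box_to_composition
-- ===== SOURCE A (Python) =====
-- def box_to_composition(box):
--     """
--     从box分出椎骨，椎间盘，骶骨和最大方框
--     """
--     b=[]
--     l=[]
--     t=[]
--     x=[]
--     b_count=0
--     x_count=0
--     for index,target in enumerate(box):
--         if target[4]<=1:
--             l.append(target)
--         elif target[4] ==7 and b_count==0:
--             b=target
--             b_count=1
--         elif target[4]==8 and x_count==0:
--             x=target
--             x_count=1
--         else:
--             t.append(target)
--     return b,l,t,x
-- ===== SOURCE B (Python) =====
-- def box_to_composition(box):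
--     """
--     从box分出椎骨，椎间盘，骶骨和最大方框
--     """
--     l = [r for r in box if r[4] <= 1]
--     f7 = next(((i, r) for i, r in enumerate(box) if r[4] == 7), None)
--     f8 = next(((i, r) for i, r in enumerate(box) if r[4] == 8), None)
--     b, bi = (f7[1], f7[0]) if f7 is not None else ([], None)
--     x, xi = (f8[1], f8[0]) if f8 is not None else ([], None)
--     t = [r for i, r in enumerate(box) if r[4] > 1 and i != bi and i != xi]
--     return b, l, t, x
-- ===== Notes on version B (the rewrite author's own statement) =====
-- stated objective: simpler
-- what changed: Replaces the single flag-driven loop with independent passes: a comprehension for the <=1 class, two enumerate-based first-match searches for the 7 and 8 boxes, and a comprehension that rebuilds the rest excluding those two indices.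
import Mathlib
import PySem

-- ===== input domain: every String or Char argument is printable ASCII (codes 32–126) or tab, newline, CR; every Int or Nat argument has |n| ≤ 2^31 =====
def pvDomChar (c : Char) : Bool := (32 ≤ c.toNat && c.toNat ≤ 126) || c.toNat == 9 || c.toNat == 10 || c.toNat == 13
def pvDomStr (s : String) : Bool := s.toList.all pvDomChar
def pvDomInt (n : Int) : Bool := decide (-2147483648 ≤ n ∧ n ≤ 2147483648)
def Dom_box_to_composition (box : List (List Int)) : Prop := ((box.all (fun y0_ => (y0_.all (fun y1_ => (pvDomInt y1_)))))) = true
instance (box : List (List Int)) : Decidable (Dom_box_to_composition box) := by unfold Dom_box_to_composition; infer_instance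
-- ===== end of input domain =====

-- B builds each category with its own pass (comprehension + two first-match searches by index)
-- instead of A's one flag-driven loop; same cost, plainer structure.

-- target[4]; exact under Pre_ (every row has length ≥ 5, so Python never raises)
def pvAt4 (r : List Int) : Int := PySem.List.pyGetD r 4 0

-- ===== PORT A =====
-- the for-loop of A, state (b, l, t, x, b_count, x_count)
def pvALoop (rs : List (List Int)) (b : List Int) (l t : List (List Int)) (x : List Int)
    (bc xc : Int) : List Int × List (List Int) × List (List Int) × List Int :=
  match rs with
  | [] => (b, l, t, x)
  | r :: rs =>
    if pvAt4 r ≤ 1 then pvALoop rs b (l ++ [r]) t x bc xc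
    else if pvAt4 r = 7 ∧ bc = 0 then pvALoop rs r l t x 1 xc
    else if pvAt4 r = 8 ∧ xc = 0 then pvALoop rs b l t r bc 1
    else pvALoop rs b l (t ++ [r]) x bc xc

def box_to_composition (box : List (List Int)) : List Int × List (List Int) × List (List Int) × List Int :=
  pvALoop box [] [] [] [] 0 0

-- ===== PORT B =====
def box_to_composition_alt (box : List (List Int)) : List Int × List (List Int) × List (List Int) × List Int :=
  let l := box.filter (fun r => decide (pvAt4 r ≤ 1))
  let f7 := (PySem.List.enumerate box 0).find? (fun p => pvAt4 p.2 == 7)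
  let f8 := (PySem.List.enumerate box 0).find? (fun p => pvAt4 p.2 == 8)
  let b := (f7.map (·.2)).getD []
  let x := (f8.map (·.2)).getD []
  let t := ((PySem.List.enumerate box 0).filter
      (fun p => decide (1 < pvAt4 p.2 ∧ f7.map (·.1) ≠ some p.1 ∧ f8.map (·.1) ≠ some p.1))).map (·.2)
  (b, l, t, x)

-- ===== PRECONDITION & SPEC =====
-- Pre_: A evaluates target[4] on every row, raising IndexError on a row shorter than 5.
def Pre_box_to_composition (box : List (List Int)) : Prop := ∀ r ∈ box, 5 ≤ r.length
instance (box : List (List Int)) : Decidable (Pre_box_to_composition box) := by unfold Pre_box_to_composition; infer_instance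
def pvWitness_box_to_composition : List (List Int) := [[0,0,0,0,7],[1,1,1,1,0],[2,2,2,2,8],[3,3,3,3,9]]

def Spec_box_to_composition (box : List (List Int)) (out : List Int × List (List Int) × List (List Int) × List Int) : Prop := out = box_to_composition_alt box
instance (box : List (List Int)) (out : List Int × List (List Int) × List (List Int) × List Int) : Decidable (Spec_box_to_composition box out) := by unfold Spec_box_to_composition; infer_instance

-- ===== CLAIM (what is proved, stated in full; the proofs are below) =====
def Claim_equal_box_to_composition : Prop := ∀ (box : List (List Int)), Dom_box_to_composition box → Pre_box_to_composition box → Spec_box_to_composition box (box_to_composition box)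

-- ===== LEMMAS AND PROOFS =====

-- the "t" list both programs produce, as one recursion (proof-side characterisation)
def pvTSpec (rs : List (List Int)) (s7 s8 : Bool) : List (List Int) :=
  match rs with
  | [] => []
  | r :: rs =>
    if pvAt4 r ≤ 1 then pvTSpec rs s7 s8
    else if pvAt4 r = 7 ∧ s7 = false then pvTSpec rs true s8
    else if pvAt4 r = 8 ∧ s8 = false then pvTSpec rs s7 true
    else r :: pvTSpec rs s7 s8

theorem pvALoop_eq (rs : List (List Int)) : ∀ (b : List Int) (l t : List (List Int)) (x : List Int) (s7 s8 : Bool),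
    pvALoop rs b l t x (cond s7 1 0) (cond s8 1 0) =
      ((if s7 then b else (rs.find? (fun r => pvAt4 r == 7)).getD b),
       l ++ rs.filter (fun r => decide (pvAt4 r ≤ 1)),
       t ++ pvTSpec rs s7 s8,
       (if s8 then x else (rs.find? (fun r => pvAt4 r == 8)).getD x)) := by
  induction rs with
  | nil => intro b l t x s7 s8; simp [pvALoop, pvTSpec]
  | cons r rs ih =>
    intro b l t x s7 s8
    by_cases h1 : pvAt4 r ≤ 1
    · have h7 : (pvAt4 r == 7) = false := by simp; omega
      have h8 : (pvAt4 r == 8) = false := by simp; omega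
      simp [pvALoop, pvTSpec, h1, ih, List.find?, h7, h8]
    · by_cases h7 : pvAt4 r = 7
      · cases s7 with
        | false =>
          have : pvALoop (r :: rs) b l t x (cond false 1 0) (cond s8 1 0)
              = pvALoop rs r l t x (cond true 1 0) (cond s8 1 0) := by
            simp [pvALoop, h7]
          rw [this, ih]
          have h8 : (pvAt4 r == 8) = false := by simp; omega
          simp [pvTSpec, h7, List.find?]
        | true =>
          have : pvALoop (r :: rs) b l t x (cond true 1 0) (cond s8 1 0)
              = pvALoop rs b l (t ++ [r]) x (cond true 1 0) (cond s8 1 0) := by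
            simp [pvALoop, h7]
          rw [this, ih]
          have h8 : (pvAt4 r == 8) = false := by simp; omega
          simp [pvTSpec, h7, List.find?]
      · by_cases h8 : pvAt4 r = 8
        · cases s8 with
          | false =>
            have : pvALoop (r :: rs) b l t x (cond s7 1 0) (cond false 1 0)
                = pvALoop rs b l t r (cond s7 1 0) (cond true 1 0) := by
              cases s7 <;> simp [pvALoop, h8]
            rw [this, ih]
            have h7' : (pvAt4 r == 7) = false := by simp; omega
            simp [pvTSpec, h8, List.find?]
          | true =>
            have : pvALoop (r :: rs) b l t x (cond s7 1 0) (cond true 1 0)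
                = pvALoop rs b l (t ++ [r]) x (cond s7 1 0) (cond true 1 0) := by
              cases s7 <;> simp [pvALoop, h8]
            rw [this, ih]
            have h7' : (pvAt4 r == 7) = false := by simp; omega
            simp [pvTSpec, h8, List.find?]
        · have : pvALoop (r :: rs) b l t x (cond s7 1 0) (cond s8 1 0)
              = pvALoop rs b l (t ++ [r]) x (cond s7 1 0) (cond s8 1 0) := by
            cases s7 <;> cases s8 <;> simp [pvALoop, h1, h7, h8]
          rw [this, ih]
          have h7' : (pvAt4 r == 7) = false := by simp; omega
          have h8' : (pvAt4 r == 8) = false := by simp; omega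
          simp [pvTSpec, h1, h7, h8, List.find?, h7', h8']

theorem find?_enumerate_fst_ge (rs : List (List Int)) (q : List Int → Bool) :
    ∀ (k : Int) (p : Int × List Int),
      (PySem.List.enumerate rs k).find? (fun p => q p.2) = some p → k ≤ p.1 := by
  induction rs with
  | nil => intro k p h; simp [PySem.List.enumerate_nil] at h
  | cons r rs ih =>
    intro k p h
    rw [PySem.List.enumerate_cons] at h
    by_cases hq : q r
    · rw [List.find?_cons_of_pos (by simpa using hq)] at h
      cases h; simp
    · rw [List.find?_cons_of_neg (by simpa using hq)] at h
      have := ih (k + 1) p h; omega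

theorem find?_enumerate_snd (rs : List (List Int)) (q : List Int → Bool) :
    ∀ (k : Int), ((PySem.List.enumerate rs k).find? (fun p => q p.2)).map (·.2)
      = rs.find? q := by
  induction rs with
  | nil => intro k; simp [PySem.List.enumerate_nil]
  | cons r rs ih =>
    intro k
    rw [PySem.List.enumerate_cons]
    by_cases hq : q r <;> simp [List.find?, hq, ih]

-- the index-excluding filter of B equals the flag recursion pvTSpec
theorem pvT_eq (rs : List (List Int)) : ∀ (k : Int) (o7 o8 : Option Int) (s7 s8 : Bool),
    (if s7 then ∀ j, o7 = some j → j < k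
     else o7 = ((PySem.List.enumerate rs k).find? (fun q => pvAt4 q.2 == 7)).map (·.1)) →
    (if s8 then ∀ j, o8 = some j → j < k
     else o8 = ((PySem.List.enumerate rs k).find? (fun q => pvAt4 q.2 == 8)).map (·.1)) →
    ((PySem.List.enumerate rs k).filter
        (fun p => decide (1 < pvAt4 p.2 ∧ o7 ≠ some p.1 ∧ o8 ≠ some p.1))).map (·.2)
      = pvTSpec rs s7 s8 := by
  induction rs with
  | nil => intro k o7 o8 s7 s8 h7 h8; simp [PySem.List.enumerate_nil, pvTSpec]
  | cons r rs ih =>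
    intro k o7 o8 s7 s8 h7 h8
    rw [PySem.List.enumerate_cons]
    -- the head's test for o7 / o8
    have head7 : o7 ≠ some k ∨ (pvAt4 r = 7 ∧ s7 = false ∧ o7 = some k) := by
      cases s7 with
      | true =>
        rw [if_pos rfl] at h7
        left; intro hc; have := h7 k hc; omega
      | false =>
        rw [if_neg (by simp)] at h7
        rw [PySem.List.enumerate_cons] at h7
        by_cases hq : pvAt4 r = 7
        · rw [List.find?_cons_of_pos (by simp [hq])] at h7
          right; exact ⟨hq, rfl, by simpa using h7⟩
        · rw [List.find?_cons_of_neg (by simp [hq])] at h7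
          left; intro hc
          obtain ⟨p, hp, hp1⟩ := Option.map_eq_some_iff.mp (hc ▸ h7).symm
          have hge := find?_enumerate_fst_ge rs (fun y => pvAt4 y == 7) (k+1) p hp
          have hk : p.1 = k := hp1
          omega
    have head8 : o8 ≠ some k ∨ (pvAt4 r = 8 ∧ s8 = false ∧ o8 = some k) := by
      cases s8 with
      | true =>
        rw [if_pos rfl] at h8
        left; intro hc; have := h8 k hc; omega
      | false =>
        rw [if_neg (by simp)] at h8
        rw [PySem.List.enumerate_cons] at h8
        by_cases hq : pvAt4 r = 8
        · rw [List.find?_cons_of_pos (by simp [hq])] at h8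
          right; exact ⟨hq, rfl, by simpa using h8⟩
        · rw [List.find?_cons_of_neg (by simp [hq])] at h8
          left; intro hc
          obtain ⟨p, hp, hp1⟩ := Option.map_eq_some_iff.mp (hc ▸ h8).symm
          have hge := find?_enumerate_fst_ge rs (fun y => pvAt4 y == 8) (k+1) p hp
          have hk : p.1 = k := hp1
          omega
    -- tail hypotheses for the IH at k+1
    have tail7 : ∀ s7' : Bool,
        (pvAt4 r = 7 → s7 = false → s7' = true) →
        (¬ (pvAt4 r = 7 ∧ s7 = false) → s7' = s7) →
        (if s7' then ∀ j, o7 = some j → j < k + 1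
         else o7 = ((PySem.List.enumerate rs (k+1)).find? (fun q => pvAt4 q.2 == 7)).map (·.1)) := by
      intro s7' hset hkeep
      by_cases hc : pvAt4 r = 7 ∧ s7 = false
      · rw [hset hc.1 hc.2, if_pos rfl]
        rcases head7 with h | ⟨_, _, ho⟩
        · exfalso
          rw [if_neg (by simp [hc.2]), PySem.List.enumerate_cons,
            List.find?_cons_of_pos (by simp [hc.1])] at h7
          exact h (by simpa using h7)
        · intro j hj; rw [ho] at hj; cases hj; omega
      · rw [hkeep hc]
        cases s7 with
        | true =>
          rw [if_pos rfl] at h7 ⊢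
          intro j hj; have := h7 j hj; omega
        | false =>
          have h7' : pvAt4 r ≠ 7 := fun h => hc ⟨h, rfl⟩
          rw [if_neg (by simp)] at h7 ⊢
          rw [PySem.List.enumerate_cons, List.find?_cons_of_neg (by simp [h7'])] at h7
          exact h7
    have tail8 : ∀ s8' : Bool,
        (pvAt4 r = 8 → s8 = false → s8' = true) →
        (¬ (pvAt4 r = 8 ∧ s8 = false) → s8' = s8) →
        (if s8' then ∀ j, o8 = some j → j < k + 1
         else o8 = ((PySem.List.enumerate rs (k+1)).find? (fun q => pvAt4 q.2 == 8)).map (·.1)) := by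
      intro s8' hset hkeep
      by_cases hc : pvAt4 r = 8 ∧ s8 = false
      · rw [hset hc.1 hc.2, if_pos rfl]
        rcases head8 with h | ⟨_, _, ho⟩
        · exfalso
          rw [if_neg (by simp [hc.2]), PySem.List.enumerate_cons,
            List.find?_cons_of_pos (by simp [hc.1])] at h8
          exact h (by simpa using h8)
        · intro j hj; rw [ho] at hj; cases hj; omega
      · rw [hkeep hc]
        cases s8 with
        | true =>
          rw [if_pos rfl] at h8 ⊢
          intro j hj; have := h8 j hj; omega
        | false =>
          have h8' : pvAt4 r ≠ 8 := fun h => hc ⟨h, rfl⟩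
          rw [if_neg (by simp)] at h8 ⊢
          rw [PySem.List.enumerate_cons, List.find?_cons_of_neg (by simp [h8'])] at h8
          exact h8
    by_cases h1 : pvAt4 r ≤ 1
    · have hd : ¬ (1 < pvAt4 r ∧ o7 ≠ some k ∧ o8 ≠ some k) := by intro h; omega
      rw [List.filter_cons]
      simp only [decide_eq_true_eq, hd, if_false]
      rw [ih (k+1) o7 o8 s7 s8 (tail7 s7 (by intro h; omega) (fun _ => rfl))
            (tail8 s8 (by intro h; omega) (fun _ => rfl))]
      simp only [pvTSpec, if_pos h1]
    · by_cases hc7 : pvAt4 r = 7 ∧ s7 = false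
      · -- head is the first 7: excluded by index
        rcases head7 with h | ⟨_, _, ho⟩
        · exfalso
          rw [if_neg (by simp [hc7.2]), PySem.List.enumerate_cons,
            List.find?_cons_of_pos (by simp [hc7.1])] at h7
          exact h (by simpa using h7)
        · have hd : ¬ (1 < pvAt4 r ∧ o7 ≠ some k ∧ o8 ≠ some k) := by
            intro h; exact h.2.1 ho
          rw [List.filter_cons]
          simp only [decide_eq_true_eq, hd, if_false]
          rw [ih (k+1) o7 o8 true s8 (tail7 true (fun _ _ => rfl) (fun h => absurd hc7 h))
                (tail8 s8 (by intro h _; exfalso; omega) (fun _ => rfl))]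
          simp only [pvTSpec, if_neg h1, if_pos (⟨hc7.1, hc7.2⟩ : pvAt4 r = 7 ∧ s7 = false)]
      · by_cases hc8 : pvAt4 r = 8 ∧ s8 = false
        · rcases head8 with h | ⟨_, _, ho⟩
          · exfalso
            rw [if_neg (by simp [hc8.2]), PySem.List.enumerate_cons,
              List.find?_cons_of_pos (by simp [hc8.1])] at h8
            exact h (by simpa using h8)
          · have hd : ¬ (1 < pvAt4 r ∧ o7 ≠ some k ∧ o8 ≠ some k) := by
              intro h; exact h.2.2 ho
            rw [List.filter_cons]
            simp only [decide_eq_true_eq, hd, if_false]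
            rw [ih (k+1) o7 o8 s7 true (tail7 s7 (by intro h _; exfalso; omega) (fun _ => rfl))
                  (tail8 true (fun _ _ => rfl) (fun h => absurd hc8 h))]
            simp only [pvTSpec, if_neg h1, if_neg hc7,
              if_pos (⟨hc8.1, hc8.2⟩ : pvAt4 r = 8 ∧ s8 = false)]
        · -- kept in t
          rcases head7 with ho7 | h; swap
          · exact absurd ⟨h.1, h.2.1⟩ hc7
          rcases head8 with ho8 | h; swap
          · exact absurd ⟨h.1, h.2.1⟩ hc8
          have hd : (1 < pvAt4 r ∧ o7 ≠ some k ∧ o8 ≠ some k) := ⟨by omega, ho7, ho8⟩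
          rw [List.filter_cons]
          simp only [decide_eq_true_eq]
          rw [if_pos hd, List.map_cons]
          rw [ih (k+1) o7 o8 s7 s8 (tail7 s7 (by intro h hh; exact absurd ⟨h, hh⟩ hc7) (fun _ => rfl))
                (tail8 s8 (by intro h hh; exact absurd ⟨h, hh⟩ hc8) (fun _ => rfl))]
          simp only [pvTSpec, if_neg h1, if_neg hc7, if_neg hc8]

-- ===== VERDICT (by name: the statement is the Claim_ definition above) =====
theorem box_to_composition_spec : Claim_equal_box_to_composition := by
  intro box _ _
  unfold Spec_box_to_composition box_to_composition box_to_composition_alt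
  have hA := pvALoop_eq box [] [] [] [] false false
  simp only [Bool.cond_false, Bool.false_eq_true, if_false] at hA
  rw [hA]
  have hb := find?_enumerate_snd box (fun r => pvAt4 r == 7) 0
  have hx := find?_enumerate_snd box (fun r => pvAt4 r == 8) 0
  have ht := pvT_eq box 0
      (((PySem.List.enumerate box 0).find? (fun q => pvAt4 q.2 == 7)).map (·.1))
      (((PySem.List.enumerate box 0).find? (fun q => pvAt4 q.2 == 8)).map (·.1))
      false false (by simp) (by simp)
  simp only []
  rw [ht, ← hb, ← hx]
  cases hf7 : (PySem.List.enumerate box 0).find? (fun q => pvAt4 q.2 == 7) <;>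
  cases hf8 : (PySem.List.enumerate box 0).find? (fun q => pvAt4 q.2 == 8) <;>
  simp
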